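-- pv_equiv track=rewrite | github.com/rifle-ak/Bastion-Server | agent/tools/incident_timeline.py | _get_severity_icon
-- ===== SOURCE A (Python) =====
-- def _get_severity_icon(message: str) -> str:
--     """Get severity icon based on message content."""
--     msg_lower = message.lower()
--     if any(kw in msg_lower for kw in ("fatal", "panic", "oom", "killed", "crash", "segfault")):
--         return "✗"
--     if any(kw in msg_lower for kw in ("error", "fail", "die", "exited")):
--         return "✗"
--     if any(kw in msg_lower for kw in ("warn", "timeout", "refused", "restart")):
--         return "⚠"
--     return " "
-- ===== SOURCE B (Python) =====
-- _SEVERITY_RANKS = {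
--     "fatal": 2, "panic": 2, "oom": 2, "killed": 2, "crash": 2, "segfault": 2,
--     "error": 2, "fail": 2, "die": 2, "exited": 2,
--     "warn": 1, "timeout": 1, "refused": 1, "restart": 1,
-- }
--
-- def _get_severity_icon(message: str) -> str:
--     """Get severity icon based on message content."""
--     m = message.lower()
--     rank = 0
--     for kw, r in _SEVERITY_RANKS.items():
--         if kw in m:
--             rank = max(rank, r)
--     return "✗" if rank == 2 else ("⚠" if rank == 1 else " ")
-- ===== Notes on version B (the rewrite author's own statement) =====
-- stated objective: alternative
-- what changed: Replaces the ordered short-circuit chain of three any() guards by a single data-driven pass: a keyword-to-rank table folded with max, then the final rank translated to its icon.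
import Mathlib
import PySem

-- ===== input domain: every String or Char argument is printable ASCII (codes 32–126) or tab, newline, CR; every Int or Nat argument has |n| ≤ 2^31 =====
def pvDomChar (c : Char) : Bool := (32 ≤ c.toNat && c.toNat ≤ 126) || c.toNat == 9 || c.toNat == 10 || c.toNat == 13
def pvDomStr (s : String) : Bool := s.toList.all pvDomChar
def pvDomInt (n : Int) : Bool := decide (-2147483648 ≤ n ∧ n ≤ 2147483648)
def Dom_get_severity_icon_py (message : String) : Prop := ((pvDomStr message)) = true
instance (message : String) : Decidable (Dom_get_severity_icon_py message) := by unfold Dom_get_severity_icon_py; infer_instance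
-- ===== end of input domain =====

-- B replaces A's ordered guard chain by one fold over a keyword→rank table computing the max rank; same result, data-driven decomposition.

-- ===== PORT A =====
def get_severity_icon_py (message : String) : String :=
  let msg_lower := PySem.Str.lower message
  if ["fatal","panic","oom","killed","crash","segfault"].any (fun kw => PySem.Str.isIn kw msg_lower) then "✗"
  else if ["error","fail","die","exited"].any (fun kw => PySem.Str.isIn kw msg_lower) then "✗"
  else if ["warn","timeout","refused","restart"].any (fun kw => PySem.Str.isIn kw msg_lower) then "⚠"
  else " "

-- ===== PORT B =====
def severityRanks : List (String × Nat) :=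
  [("fatal",2),("panic",2),("oom",2),("killed",2),("crash",2),("segfault",2),
   ("error",2),("fail",2),("die",2),("exited",2),
   ("warn",1),("timeout",1),("refused",1),("restart",1)]

def get_severity_icon_py_alt (message : String) : String :=
  let m := PySem.Str.lower message
  let rank := severityRanks.foldl (fun acc p => if PySem.Str.isIn p.1 m then Nat.max acc p.2 else acc) 0
  if rank == 2 then "✗" else if rank == 1 then "⚠" else " "

-- ===== PRECONDITION & SPEC =====
def Spec_get_severity_icon_py (message : String) (out : String) : Prop := out = get_severity_icon_py_alt message
instance (message : String) (out : String) : Decidable (Spec_get_severity_icon_py message out) := by unfold Spec_get_severity_icon_py; infer_instance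

-- ===== CLAIM (what is proved, stated in full; the proofs are below) =====
def Claim_equal_get_severity_icon_py : Prop := ∀ (message : String), Dom_get_severity_icon_py message → Spec_get_severity_icon_py message (get_severity_icon_py message)

-- ===== LEMMAS AND PROOFS =====

-- A fold over keyword/rank pairs that all carry the same rank v computes:
-- max with v if any keyword satisfies c, otherwise the accumulator unchanged.
lemma fold_const_snd (m : String) (v : Nat) (kws : List String) (a : Nat) :
    (kws.map (fun k => (k, v))).foldl
        (fun acc p => if PySem.Str.isIn p.1 m then Nat.max acc p.2 else acc) a
      = if kws.any (fun kw => PySem.Str.isIn kw m) then Nat.max a v else a := by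
  induction kws generalizing a with
  | nil => simp
  | cons k t ih =>
    simp only [List.map_cons, List.foldl_cons, List.any_cons]
    rw [ih]
    rcases Bool.eq_false_or_eq_true (PySem.Str.isIn k m) with hc | hc <;>
      rcases Bool.eq_false_or_eq_true (t.any (fun kw => PySem.Str.isIn kw m)) with ht | ht <;>
      simp only [hc, ht] <;> simp

lemma severityRanks_split :
    severityRanks
      = (["fatal","panic","oom","killed","crash","segfault","error","fail","die","exited"].map
          (fun k => (k, 2)))
        ++ (["warn","timeout","refused","restart"].map (fun k => (k, 1))) := by
  rfl

-- ===== VERDICT (by name: the statement is the Claim_ definition above) =====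
theorem get_severity_icon_py_spec : Claim_equal_get_severity_icon_py := by
  intro message _
  unfold Spec_get_severity_icon_py get_severity_icon_py get_severity_icon_py_alt
  dsimp only
  rw [severityRanks_split]
  rw [List.foldl_append, fold_const_snd, fold_const_snd]
  simp only [show (["fatal","panic","oom","killed","crash","segfault","error","fail","die",
      "exited"] : List String)
      = ["fatal","panic","oom","killed","crash","segfault"] ++ ["error","fail","die","exited"]
      from rfl, List.any_append]
  rcases Bool.eq_false_or_eq_true ((["fatal","panic","oom","killed","crash","segfault"] :
      List String).any (fun kw => PySem.Str.isIn kw (PySem.Str.lower message))) with h1 | h1 <;>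
    rcases Bool.eq_false_or_eq_true ((["error","fail","die","exited"] :
        List String).any (fun kw => PySem.Str.isIn kw (PySem.Str.lower message))) with h2 | h2 <;>
    rcases Bool.eq_false_or_eq_true ((["warn","timeout","refused","restart"] :
        List String).any (fun kw => PySem.Str.isIn kw (PySem.Str.lower message))) with h3 | h3 <;>
    simp only [h1, h2, h3] <;> simp
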